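-- pv_equiv track=rewrite | github.com/KahinaBch/ad-reproducibility-audit | src/scan_keywords_update_workbook.py | scan_keywords
-- ===== SOURCE A (Python) =====
-- CODE_REPRO_KEYWORDS = [
--     "code available",
--     "code availability",
--     "source code",
--     "open source",
--     "open-source",
--     "open code",
--     "code sharing",
--     "supplementary code",
--     "reproducible",
--     "reproducibility",
--     "reproducible research",
--     "workflow",
--     "pipeline",
--     "script",
--     "github",
--     "gitlab",
--     "bitbucket",
--     "osf",
--     "zenodo",
--     "repository",
-- ]
--
-- def scan_keywords(pages: list[str]) -> list[str]:
--     """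
--     Scan pages for code-availability and reproducibility keywords.
--     Stops scanning pages once a keyword is found (replicates MRM notebook logic).
--     Returns list of matched keywords.
--     """
--     matched = set()
--     for keyword in CODE_REPRO_KEYWORDS:
--         for page_text in pages:
--             if keyword.lower() in page_text.lower():
--                 matched.add(keyword)
--                 break  # Stop scanning pages for this keyword once found
--     return sorted(matched)
-- ===== SOURCE B (Python) =====
-- CODE_REPRO_KEYWORDS = [
--     "code available",
--     "code availability",
--     "source code",
--     "open source",
--     "open-source",
--     "open code",
--     "code sharing",
--     "supplementary code",
--     "reproducible",
--     "reproducibility",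
--     "reproducible research",
--     "workflow",
--     "pipeline",
--     "script",
--     "github",
--     "gitlab",
--     "bitbucket",
--     "osf",
--     "zenodo",
--     "repository",
-- ]
--
-- def scan_keywords(pages: list[str]) -> list[str]:
--     """
--     Scan pages for code-availability and reproducibility keywords.
--     Builds one lowercased haystack (pages joined by '\n', which no keyword
--     contains, so no match can span a page boundary), then tests each keyword
--     once against it.  Keywords are already lowercase.
--     """
--     text = "\n".join(page.lower() for page in pages)
--     return sorted(kw for kw in CODE_REPRO_KEYWORDS if kw in text)
-- ===== Notes on version B (the rewrite author's own statement) =====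
-- stated objective: simpler
-- what changed: Replaces the per-keyword inner page loop with break and incremental set building by one prebuilt lowercased haystack (pages joined by '\n', a separator no keyword contains) and a single filtering pass over the keyword list.
import Mathlib
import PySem

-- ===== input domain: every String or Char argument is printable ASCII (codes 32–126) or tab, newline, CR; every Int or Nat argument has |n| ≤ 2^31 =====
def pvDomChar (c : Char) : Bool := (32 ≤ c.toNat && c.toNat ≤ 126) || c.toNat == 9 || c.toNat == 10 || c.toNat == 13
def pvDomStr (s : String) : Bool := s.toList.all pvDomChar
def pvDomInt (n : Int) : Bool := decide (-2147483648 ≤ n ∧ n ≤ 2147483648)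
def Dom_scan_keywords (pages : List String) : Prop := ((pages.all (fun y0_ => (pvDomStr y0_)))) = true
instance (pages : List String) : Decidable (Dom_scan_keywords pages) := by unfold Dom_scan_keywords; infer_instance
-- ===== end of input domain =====

-- B builds one lowercased haystack ("\n".join of the pages) and filters the keyword
-- list in a single pass against it, instead of A's per-keyword page loop with break
-- and incremental set building: a simpler, differently shaped scan, same results.


-- ===== PORT A =====
-- the module constant CODE_REPRO_KEYWORDS (shared by both Pythons)
def pvKeywords : List String :=
  ["code available", "code availability", "source code", "open source", "open-source",
   "open code", "code sharing", "supplementary code", "reproducible", "reproducibility",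
   "reproducible research", "workflow", "pipeline", "script", "github", "gitlab",
   "bitbucket", "osf", "zenodo", "repository"]

-- A's inner 'for page_text in pages: … break' loop for one keyword
def pvScanPages (kw : String) (pages : List String) (m : PySem.Set String) : PySem.Set String :=
  match pages with
  | [] => m
  | p :: rest =>
      if PySem.Str.isIn (PySem.Str.lower kw) (PySem.Str.lower p) then PySem.Set.add m kw
      else pvScanPages kw rest m

def scan_keywords (pages : List String) : List String :=
  PySem.List.sorted
    (pvKeywords.foldl (fun m kw => pvScanPages kw pages m) PySem.Set.empty)
    (fun x => x) false

-- ===== PORT B =====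
def scan_keywords_alt (pages : List String) : List String :=
  let text := PySem.Str.join "\n" (pages.map (fun page => PySem.Str.lower page))
  PySem.List.sorted
    (pvKeywords.filter (fun kw => PySem.Str.isIn kw text))
    (fun x => x) false

-- ===== PRECONDITION & SPEC =====
def Spec_scan_keywords (pages : List String) (out : List String) : Prop := out = scan_keywords_alt pages
instance (pages : List String) (out : List String) : Decidable (Spec_scan_keywords pages out) := by unfold Spec_scan_keywords; infer_instance

-- ===== CLAIM (what is proved, stated in full; the proofs are below) =====
def Claim_equal_scan_keywords : Prop := ∀ (pages : List String), Dom_scan_keywords pages → Spec_scan_keywords pages (scan_keywords pages)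

-- ===== LEMMAS AND PROOFS =====

-- a prefix of u ++ c :: v not containing c is a prefix of u
theorem pv_prefix_split {kw u v : List Char} {c : Char} (hc : c ∉ kw) :
    kw <+: u ++ c :: v → kw <+: u := by
  induction kw generalizing u with
  | nil => intro _; exact List.nil_prefix
  | cons k kt ih =>
    intro h
    cases u with
    | nil =>
      rw [List.nil_append, List.cons_prefix_cons] at h
      exact absurd (h.1 ▸ List.mem_cons_self) hc
    | cons y u' =>
      rw [List.cons_append, List.cons_prefix_cons] at h
      exact List.cons_prefix_cons.2 ⟨h.1, ih (fun hm => hc (List.mem_cons_of_mem _ hm)) h.2⟩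

-- an infix of u ++ c :: v not containing c (and nonempty) lies in u or in v
theorem pv_infix_split {kw : List Char} {c : Char} (hkw : kw ≠ []) (hc : c ∉ kw) :
    ∀ {a b : List Char}, kw <:+: a ++ c :: b → kw <:+: a ∨ kw <:+: b := by
  intro a
  induction a with
  | nil =>
    intro b h
    rw [List.nil_append, List.infix_cons_iff] at h
    rcases h with hp | hi
    · cases kw with
      | nil => exact absurd rfl hkw
      | cons k kt =>
        rw [List.cons_prefix_cons] at hp
        exact absurd (hp.1 ▸ List.mem_cons_self) hc
    · exact Or.inr hi
  | cons x a' ih =>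
    intro b h
    rw [List.cons_append, List.infix_cons_iff] at h
    rcases h with hp | hi
    · exact Or.inl ((pv_prefix_split (u := x :: a') hc hp).isInfix)
    · rcases ih hi with h1 | h2
      · exact Or.inl (h1.trans (List.suffix_cons x a').isInfix)
      · exact Or.inr h2

-- a nonempty separator-free word is an infix of the intercalation iff of some piece
theorem pv_infix_intercalate {kw : List Char} {c : Char} (hkw : kw ≠ []) (hc : c ∉ kw) :
    ∀ xs : List (List Char), (kw <:+: List.intercalate [c] xs ↔ ∃ x ∈ xs, kw <:+: x) := by
  intro xs
  induction xs with
  | nil =>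
    simp [List.intercalate, List.intersperse, List.infix_nil, hkw]
  | cons x xs ih =>
    cases xs with
    | nil =>
      simp [List.intercalate, List.intersperse]
    | cons y rest =>
      have hstep : List.intercalate [c] (x :: y :: rest)
          = x ++ c :: List.intercalate [c] (y :: rest) := by
        simp [List.intercalate, List.intersperse]
      rw [hstep]
      constructor
      · intro h
        rcases pv_infix_split hkw hc h with h1 | h2
        · exact ⟨x, List.mem_cons_self, h1⟩
        · rcases ih.1 h2 with ⟨z, hz, hzi⟩
          exact ⟨z, List.mem_cons_of_mem _ hz, hzi⟩
      · rintro ⟨z, hz, hzi⟩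
        rcases List.mem_cons.1 hz with rfl | hz'
        · exact hzi.trans (List.prefix_append _ _).isInfix
        · have : kw <:+: List.intercalate [c] (y :: rest) := ih.2 ⟨z, hz', hzi⟩
          calc kw <:+: List.intercalate [c] (y :: rest) := this
            _ <:+: x ++ c :: List.intercalate [c] (y :: rest) :=
              ((List.suffix_cons c _).trans (List.suffix_append _ _)).isInfix

-- A's inner loop adds kw exactly when some page contains it
theorem pv_scanPages_eq (kw : String) (pages : List String) (m : PySem.Set String) :
    pvScanPages kw pages m =
      if pages.any (fun p => PySem.Str.isIn (PySem.Str.lower kw) (PySem.Str.lower p))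
      then PySem.Set.add m kw else m := by
  induction pages with
  | nil => simp [pvScanPages]
  | cons p rest ih =>
    by_cases h : PySem.Chars.isIn (PySem.Chars.lower kw.toList) (PySem.Chars.lower p.toList) = true
    · simp [pvScanPages, h]
    · simp only [Bool.not_eq_true] at h
      simp [pvScanPages, h, ih]

-- A's outer fold over distinct fresh keywords appends exactly the matching ones
theorem pv_fold_eq (pages : List String) :
    ∀ (kws : List String) (m : PySem.Set String), kws.Nodup → (∀ k ∈ kws, k ∉ m) →
      kws.foldl (fun m kw => pvScanPages kw pages m) m
        = m ++ kws.filter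
            (fun kw => pages.any fun p => PySem.Str.isIn (PySem.Str.lower kw) (PySem.Str.lower p)) := by
  intro kws
  induction kws with
  | nil => intro m _ _; simp
  | cons kw rest ih =>
    intro m hnd hdisj
    have hnd' := (List.nodup_cons.1 hnd).2
    have hkwrest := (List.nodup_cons.1 hnd).1
    rw [List.foldl_cons, pv_scanPages_eq]
    by_cases hP : (pages.any fun p => PySem.Str.isIn (PySem.Str.lower kw) (PySem.Str.lower p)) = true
    · have hmem : kw ∉ m := hdisj kw List.mem_cons_self
      have hadd : PySem.Set.add m kw = m ++ [kw] := by
        unfold PySem.Set.add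
        rw [if_neg (fun hcon => hmem ((PySem.Set.contains_iff m kw).1 hcon))]
      have hdisj' : ∀ k ∈ rest, k ∉ m ++ [kw] := by
        intro k hk
        rw [List.mem_append, List.mem_singleton]
        rintro (hm | rfl)
        · exact hdisj k (List.mem_cons_of_mem _ hk) hm
        · exact hkwrest hk
      rw [hP, if_pos rfl, hadd, ih (m ++ [kw]) hnd' hdisj']
      simp only [List.filter_cons, hP]
      rw [if_pos trivial, List.append_assoc]
      rfl
    · have h' : (pages.any fun p => PySem.Str.isIn (PySem.Str.lower kw) (PySem.Str.lower p)) = false := by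
        rwa [Bool.not_eq_true] at hP
      rw [h']
      simp only [Bool.false_eq_true, if_false]
      rw [ih m hnd' (fun k hk => hdisj k (List.mem_cons_of_mem _ hk))]
      simp only [List.filter_cons, h']
      rw [if_neg Bool.false_ne_true]

-- every keyword is nonempty, newline-free and already lowercase
theorem pv_kw_props : ∀ kw ∈ pvKeywords,
    PySem.Str.lower kw = kw ∧ kw.toList ≠ [] ∧ '\n' ∉ kw.toList := by decide

-- per keyword: "some page contains it" = "the joined haystack contains it"
theorem pv_pred_eq (pages : List String) : ∀ kw ∈ pvKeywords,
    (pages.any fun p => PySem.Str.isIn (PySem.Str.lower kw) (PySem.Str.lower p))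
      = PySem.Str.isIn kw (PySem.Str.join "\n" (pages.map (fun page => PySem.Str.lower page))) := by
  intro kw hkw
  obtain ⟨hl, hne, hnc⟩ := pv_kw_props kw hkw
  rw [hl, Bool.eq_iff_iff, List.any_eq_true]
  have hjoin : (PySem.Str.join "\n" (pages.map (fun page => PySem.Str.lower page))).toList
      = List.intercalate ['\n'] (pages.map (fun page => (PySem.Str.lower page).toList)) := by
    rw [PySem.Str.toList_join]
    have : "\n".toList = ['\n'] := by decide
    rw [this, PySem.Chars.join, List.map_map]
    rfl
  rw [PySem.Str.isIn_iff_infix, hjoin,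
    pv_infix_intercalate hne hnc (pages.map (fun page => (PySem.Str.lower page).toList))]
  constructor
  · rintro ⟨p, hp, hin⟩
    exact ⟨(PySem.Str.lower p).toList, List.mem_map_of_mem hp,
      (PySem.Str.isIn_iff_infix _ _).1 hin⟩
  · rintro ⟨cs, hcs, hin⟩
    rcases List.mem_map.1 hcs with ⟨p, hp, rfl⟩
    exact ⟨p, hp, (PySem.Str.isIn_iff_infix _ _).2 hin⟩

theorem pv_keywords_nodup : pvKeywords.Nodup := by decide

-- ===== VERDICT (by name: the statement is the Claim_ definition above) =====
theorem scan_keywords_spec : Claim_equal_scan_keywords := by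
  intro pages _
  unfold Spec_scan_keywords scan_keywords scan_keywords_alt
  rw [pv_fold_eq pages pvKeywords PySem.Set.empty pv_keywords_nodup
    (by intro k _ hk; exact absurd hk List.not_mem_nil)]
  have hfc : List.filter
        (fun kw => pages.any fun p => PySem.Str.isIn (PySem.Str.lower kw) (PySem.Str.lower p)) pvKeywords
      = List.filter
        (fun kw => PySem.Str.isIn kw (PySem.Str.join "\n" (pages.map (fun page => PySem.Str.lower page)))) pvKeywords :=
    List.filter_congr (fun kw hkw => pv_pred_eq pages kw hkw)
  rw [show (PySem.Set.empty : PySem.Set String) ++ _ = _ from List.nil_append _, hfc]
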